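-- pv_equiv track=rewrite | github.com/AlexThePav/StepikBioInfo | Stepik/1 Finding Hidden Messages/Week 4/Motifs_module.py | FasterSymbolArray
-- ===== SOURCE A (Python) =====
-- def FasterSymbolArray(Genome, symbol):
--   array = {}
--   n = len(Genome)
--   ExtendedGenome = Genome + Genome[0:n//2]
--   array[0] = PatternCount(symbol, Genome[0:n//2])
--   for i in range(1, n):
--     array[i] = array[i-1]
--     if ExtendedGenome[i-1] == symbol:
--       array[i] = array[i]-1
--     if ExtendedGenome[i+(n//2)-1] == symbol:
--       array[i] = array[i]+1
--   return array
--
-- def PatternCount(Pattern, Text):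
--   count = 0 # output variable
--   for i in range(len(Text)-len(Pattern)+1):
--     if Text[i:i+len(Pattern)] == Pattern:
--       count = count+1
--   return count
-- ===== SOURCE B (Python) =====
-- def PatternCount(Pattern, Text):
--   count = 0
--   for i in range(len(Text)-len(Pattern)+1):
--     if Text[i:i+len(Pattern)] == Pattern:
--       count = count+1
--   return count
--
-- def FasterSymbolArray(Genome, symbol):
--   n = len(Genome)
--   half = n // 2
--   ExtendedGenome = Genome + Genome[0:half]
--   base = PatternCount(symbol, Genome[0:half])
--   pref = [0]
--   for c in ExtendedGenome:
--     pref.append(pref[-1] + (1 if c == symbol else 0))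
--   array = {0: base}
--   for i in range(1, n):
--     array[i] = base + (pref[i + half] - pref[half]) - pref[i]
--   return array
-- ===== Notes on version B (the rewrite author's own statement) =====
-- stated objective: alternative
-- what changed: Replaces the incremental running-update of the sliding-window count with a one-pass prefix-sum table over the extended genome, from which every window count is computed directly by a closed-form difference.
import Mathlib
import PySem

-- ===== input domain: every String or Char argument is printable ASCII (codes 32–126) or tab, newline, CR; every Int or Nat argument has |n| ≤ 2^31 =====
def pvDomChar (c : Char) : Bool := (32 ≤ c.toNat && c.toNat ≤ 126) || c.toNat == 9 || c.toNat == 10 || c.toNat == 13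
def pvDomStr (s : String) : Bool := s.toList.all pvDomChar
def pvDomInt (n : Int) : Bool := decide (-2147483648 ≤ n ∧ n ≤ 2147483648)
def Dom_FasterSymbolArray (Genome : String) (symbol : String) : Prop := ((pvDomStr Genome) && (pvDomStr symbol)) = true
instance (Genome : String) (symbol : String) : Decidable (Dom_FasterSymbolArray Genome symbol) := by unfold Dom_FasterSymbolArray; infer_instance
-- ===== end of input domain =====

-- B computes the sliding-window symbol counts from a prefix-sum table instead of A's running update; same O(n) cost, different decomposition.

-- ===== PORT A =====
-- Python's `ExtendedGenome[j] == symbol` compares a 1-character string with symbol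
-- (exact: index j is always in range in A's loop; the `none` branch is unreachable)
def pvChEqA (ext : List Char) (j : Int) (sym : List Char) : Bool :=
  match PySem.List.pyGet? ext j with
  | some c => sym == [c]
  | none => false

def PatternCount (Pattern : String) (Text : String) : Int :=
  (PySem.List.pyRange 0 (PySem.Str.len Text - PySem.Str.len Pattern + 1) 1).foldl
    (fun count i =>
      if PySem.List.slice Text.toList (some i) (some (i + PySem.Str.len Pattern)) == Pattern.toList
      then count + 1 else count) 0

def FasterSymbolArray (Genome : String) (symbol : String) : List (Int × Int) :=
  let g := Genome.toList
  let n : Int := PySem.Str.len Genome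
  let ext := g ++ PySem.List.slice g (some 0) (some (PySem.Int.floordiv n 2))
  -- array = {}; array[0] = PatternCount(symbol, Genome[0:n//2])
  let d0 : PySem.Dict Int Int :=
    PySem.Dict.empty.insert 0
      (PatternCount symbol (String.ofList (PySem.List.slice g (some 0) (some (PySem.Int.floordiv n 2)))))
  -- key i-1 is always present when read, so `getD … 0` is exact (Python's array[i-1] never raises here)
  let d := (PySem.List.pyRange 1 n 1).foldl
    (fun (d : PySem.Dict Int Int) i =>
      let d1 := d.insert i (d.getD (i - 1) 0)
      let d2 := if pvChEqA ext (i - 1) symbol.toList then d1.insert i (d1.getD i 0 - 1) else d1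
      if pvChEqA ext (i + PySem.Int.floordiv n 2 - 1) symbol.toList then d2.insert i (d2.getD i 0 + 1) else d2)
    d0
  d.items

-- ===== PORT B =====
def PatternCountB (Pattern : String) (Text : String) : Int :=
  (PySem.List.pyRange 0 (PySem.Str.len Text - PySem.Str.len Pattern + 1) 1).foldl
    (fun count i =>
      if PySem.List.slice Text.toList (some i) (some (i + PySem.Str.len Pattern)) == Pattern.toList
      then count + 1 else count) 0

def FasterSymbolArray_alt (Genome : String) (symbol : String) : List (Int × Int) :=
  let g := Genome.toList
  let n : Int := PySem.Str.len Genome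
  let half := PySem.Int.floordiv n 2
  let ext := g ++ PySem.List.slice g (some 0) (some half)
  let base := PatternCountB symbol (String.ofList (PySem.List.slice g (some 0) (some half)))
  -- pref[j] = number of characters of ExtendedGenome[:j] equal to symbol (pref[-1] is the running last entry)
  let pref : List Int := ext.foldl
    (fun pr c => pr ++ [PySem.List.pyGetD pr (-1) 0 + (if symbol.toList == [c] then 1 else 0)]) [0]
  let d := (PySem.List.pyRange 1 n 1).foldl
    (fun (d : PySem.Dict Int Int) i =>
      d.insert i (base + (PySem.List.pyGetD pref (i + half) 0 - PySem.List.pyGetD pref half 0)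
                    - PySem.List.pyGetD pref i 0))
    (PySem.Dict.empty.insert 0 base)
  d.items

-- ===== PRECONDITION & SPEC =====
def Spec_FasterSymbolArray (Genome : String) (symbol : String) (out : List (Int × Int)) : Prop := out = FasterSymbolArray_alt Genome symbol
instance (Genome : String) (symbol : String) (out : List (Int × Int)) : Decidable (Spec_FasterSymbolArray Genome symbol out) := by unfold Spec_FasterSymbolArray; infer_instance

-- ===== CLAIM (what is proved, stated in full; the proofs are below) =====
def Claim_equal_FasterSymbolArray : Prop := ∀ (Genome : String) (symbol : String), Dom_FasterSymbolArray Genome symbol → Spec_FasterSymbolArray Genome symbol (FasterSymbolArray Genome symbol)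

-- ===== LEMMAS AND PROOFS =====

-- the common closed-form value: array[k] = base + #sym in ext[half:half+k] − #sym in ext[0:k]
def pvV (p : Char → Bool) (ext : List Char) (half : Nat) (base : Int) (k : Nat) : Int :=
  base + ((ext.take (k + half)).countP p : Int) - ((ext.take half).countP p : Int)
       - ((ext.take k).countP p : Int)

theorem pvV_zero (p : Char → Bool) (ext : List Char) (half : Nat) (base : Int) :
    pvV p ext half base 0 = base := by
  simp [pvV]

theorem pv_countP_take_succ (p : Char → Bool) (l : List Char) (j : Nat) (hj : j < l.length) :
    (l.take (j + 1)).countP p = (l.take j).countP p + (if p l[j] then 1 else 0) := by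
  rw [List.take_add_one, List.getElem?_eq_getElem hj, List.countP_append]
  simp [List.countP_cons]

theorem pvV_succ (p : Char → Bool) (ext : List Char) (half : Nat) (base : Int) (k : Nat)
    (h1 : k < ext.length) (h2 : k + half < ext.length) :
    pvV p ext half base (k + 1)
      = pvV p ext half base k - (if p (ext[k]'h1) then 1 else 0)
          + (if p (ext[k + half]'h2) then 1 else 0) := by
  unfold pvV
  rw [show k + 1 + half = (k + half) + 1 by omega]
  rw [pv_countP_take_succ p ext (k + half) h2, pv_countP_take_succ p ext k h1]
  push_cast
  split_ifs <;> ring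

theorem pv_pref_fold (p : Char → Bool) (l : List Char) : ∀ (pr : List Int) (v : Int),
    PySem.List.pyGetD pr (-1) 0 = v →
    l.foldl (fun pr c => pr ++ [PySem.List.pyGetD pr (-1) 0 + (if p c then 1 else 0)]) pr
      = pr ++ (List.range l.length).map (fun j => v + ((l.take (j + 1)).countP p : Int)) := by
  induction l with
  | nil => intro pr v h; simp
  | cons c l ih =>
    intro pr v h
    simp only [List.foldl_cons]
    rw [ih (pr ++ [PySem.List.pyGetD pr (-1) 0 + (if p c then 1 else 0)])
          (v + (if p c then 1 else 0))
          (by rw [PySem.List.pyGetD_neg_one_append_singleton, h])]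
    rw [h, List.length_cons, List.range_succ_eq_map]
    simp only [List.map_cons, List.map_map, List.append_assoc, List.singleton_append]
    congr 1
    congr 1
    · simp [List.countP_cons]
    · apply List.map_congr_left
      intro j hj
      simp only [Function.comp_apply]
      rw [show j + 1 + 1 = j + 1 + 1 from rfl, List.take_succ_cons, List.countP_cons]
      push_cast
      ring

theorem pv_pref_get (p : Char → Bool) (ext : List Char) (j : Nat) (hj : j ≤ ext.length) :
    PySem.List.pyGetD
      (ext.foldl (fun pr c => pr ++ [PySem.List.pyGetD pr (-1) 0 + (if p c then 1 else 0)]) [0])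
      ((j : Nat) : Int) 0 = ((ext.take j).countP p : Int) := by
  rw [pv_pref_fold p ext [0] 0 (by decide)]
  rw [PySem.List.pyGetD_natCast]
  cases j with
  | zero => simp
  | succ j' =>
    have hj' : j' < ext.length := by omega
    rw [List.singleton_append, List.getD_cons_succ]
    rw [List.getD_eq_getElem _ _ (by simpa using hj')]
    simp

theorem pv_getD_mk_range (V : Nat → Int) (M j : Nat) (hj : j < M) :
    (PySem.Dict.mk ((List.range M).map (fun (k : Nat) => ((k : Int), V k)))).getD ((j : Nat) : Int) 0 = V j := by
  apply PySem.Dict.getD_of_mem_items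
  · exact List.mem_map.mpr ⟨j, List.mem_range.mpr hj, rfl⟩
  · show (List.map _ _).Nodup
    simp only [List.map_map]
    refine List.Nodup.map ?_ List.nodup_range
    intro a b hab
    simp only [Function.comp_apply] at hab
    exact_mod_cast hab

theorem pv_not_contains_mk_range (V : Nat → Int) (M : Nat) :
    (PySem.Dict.mk ((List.range M).map (fun (k : Nat) => ((k : Int), V k)))).contains ((M : Nat) : Int) = false := by
  rw [PySem.Dict.contains_eq_decide_mem_keys]
  simp only [PySem.Dict.keys, List.map_map, decide_eq_false_iff_not]
  intro hmem
  obtain ⟨a, ha, hab⟩ := List.mem_map.mp hmem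
  simp only [Function.comp_apply] at hab
  have h1 : a = M := by exact_mod_cast hab
  have h2 := List.mem_range.mp ha
  omega

theorem pvA_fold (sym ext : List Char) (half : Nat) (base : Int) (m : Nat) (hm : 1 ≤ m) :
    m + half ≤ ext.length →
    (PySem.List.pyRange 1 (m : Int) 1).foldl
      (fun (d : PySem.Dict Int Int) i =>
        let d1 := d.insert i (d.getD (i - 1) 0)
        let d2 := if pvChEqA ext (i - 1) sym then d1.insert i (d1.getD i 0 - 1) else d1
        if pvChEqA ext (i + ((half : Nat) : Int) - 1) sym then d2.insert i (d2.getD i 0 + 1) else d2)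
      (PySem.Dict.empty.insert 0 base)
      = PySem.Dict.mk ((List.range m).map (fun (k : Nat) => ((k : Int), pvV (fun c => sym == [c]) ext half base k))) := by
  induction m, hm using Nat.le_induction with
  | base =>
    intro hlen
    rw [show ((1 : Nat) : Int) = 1 by norm_num, PySem.List.pyRange_one_eq_nil le_rfl, List.foldl_nil]
    apply PySem.Dict.ext
    rw [PySem.Dict.items_insert_of_not_contains _ _ (by simp)]
    simp [List.range_succ, pvV_zero, PySem.Dict.empty]
  | succ m hm ih =>
    intro hlen
    have hcast : ((m + 1 : Nat) : Int) = ((m : Nat) : Int) + 1 := by push_cast; ring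
    rw [hcast, PySem.List.pyRange_one_succ_right (by exact_mod_cast hm), List.foldl_append,
        ih (by omega)]
    simp only [List.foldl_cons, List.foldl_nil]
    have e1 : ((m : Nat) : Int) - 1 = ((m - 1 : Nat) : Int) := by omega
    have e2 : ((m : Nat) : Int) + ((half : Nat) : Int) - 1 = ((m - 1 + half : Nat) : Int) := by omega
    have hb1 : m - 1 < ext.length := by omega
    have hb2 : m - 1 + half < ext.length := by omega
    have hc1 : pvChEqA ext (((m : Nat) : Int) - 1) sym = (sym == [ext[m - 1]'hb1]) := by
      rw [e1]; unfold pvChEqA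
      rw [PySem.List.pyGet?_natCast, List.getElem?_eq_getElem hb1]
    have hc2 : pvChEqA ext (((m : Nat) : Int) + ((half : Nat) : Int) - 1) sym = (sym == [ext[m - 1 + half]'hb2]) := by
      rw [e2]; unfold pvChEqA
      rw [PySem.List.pyGet?_natCast, List.getElem?_eq_getElem hb2]
    have hget : (PySem.Dict.mk ((List.range m).map (fun (k : Nat) => ((k : Int), pvV (fun c => sym == [c]) ext half base k)))).getD (((m : Nat) : Int) - 1) 0
        = pvV (fun c => sym == [c]) ext half base (m - 1) := by
      rw [e1]; exact pv_getD_mk_range _ m (m - 1) (by omega)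
    have hV := pvV_succ (fun c => sym == [c]) ext half base (m - 1) hb1 hb2
    rw [show m - 1 + 1 = m by omega] at hV
    have hfin : (PySem.Dict.mk ((List.range m).map (fun (k : Nat) => ((k : Int), pvV (fun c => sym == [c]) ext half base k)))).insert
          ((m : Nat) : Int) (pvV (fun c => sym == [c]) ext half base m)
        = PySem.Dict.mk ((List.range (m + 1)).map (fun (k : Nat) => ((k : Int), pvV (fun c => sym == [c]) ext half base k))) := by
      apply PySem.Dict.ext
      rw [PySem.Dict.items_insert_of_not_contains _ _ (pv_not_contains_mk_range _ m)]
      simp [List.range_succ]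
    rw [hV] at hfin
    simp only [hc1, hc2, hget]
    split_ifs with h1 h2 h3 <;>
      (try simp only [PySem.Dict.getD_insert_self, PySem.Dict.insert_insert_self]) <;>
      rw [← hfin] <;> congr 1 <;> simp [*]

theorem pvB_fold (p : Char → Bool) (ext : List Char) (half : Nat) (base : Int) (pref : List Int)
    (hpref : ∀ j : Nat, j ≤ ext.length → PySem.List.pyGetD pref ((j : Nat) : Int) 0 = ((ext.take j).countP p : Int))
    (m : Nat) (hm : 1 ≤ m) :
    m + half ≤ ext.length + 1 → half ≤ ext.length →
    (PySem.List.pyRange 1 (m : Int) 1).foldl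
      (fun (d : PySem.Dict Int Int) i =>
        d.insert i (base + (PySem.List.pyGetD pref (i + ((half : Nat) : Int)) 0 - PySem.List.pyGetD pref ((half : Nat) : Int) 0)
                      - PySem.List.pyGetD pref i 0))
      (PySem.Dict.empty.insert 0 base)
      = PySem.Dict.mk ((List.range m).map (fun (k : Nat) => ((k : Int), pvV p ext half base k))) := by
  induction m, hm using Nat.le_induction with
  | base =>
    intro hlen hhalf
    rw [show ((1 : Nat) : Int) = 1 by norm_num, PySem.List.pyRange_one_eq_nil le_rfl, List.foldl_nil]
    apply PySem.Dict.ext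
    rw [PySem.Dict.items_insert_of_not_contains _ _ (by simp)]
    simp [List.range_succ, pvV_zero, PySem.Dict.empty]
  | succ m hm ih =>
    intro hlen hhalf
    have hcast : ((m + 1 : Nat) : Int) = ((m : Nat) : Int) + 1 := by push_cast; ring
    rw [hcast, PySem.List.pyRange_one_succ_right (by exact_mod_cast hm), List.foldl_append,
        ih (by omega) hhalf]
    simp only [List.foldl_cons, List.foldl_nil]
    have e1 : ((m : Nat) : Int) + ((half : Nat) : Int) = ((m + half : Nat) : Int) := by push_cast; ring
    rw [e1, hpref (m + half) (by omega), hpref half (by omega), hpref m (by omega)]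
    have hval : base + (((ext.take (m + half)).countP p : Int) - ((ext.take half).countP p : Int))
          - ((ext.take m).countP p : Int) = pvV p ext half base m := by
      unfold pvV; ring
    rw [hval]
    apply PySem.Dict.ext
    rw [PySem.Dict.items_insert_of_not_contains _ _ (pv_not_contains_mk_range _ m)]
    simp [List.range_succ]

theorem FasterSymbolArray_spec : Claim_equal_FasterSymbolArray := by
  unfold Claim_equal_FasterSymbolArray
  intro Genome symbol _
  unfold Spec_FasterSymbolArray
  simp only [FasterSymbolArray, FasterSymbolArray_alt]
  set g := Genome.toList with hg
  set sym := symbol.toList with hsym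
  have hlen : PySem.Str.len Genome = ((g.length : Nat) : Int) := by
    simp [PySem.Str.len_eq, hg]
  have hhalf : PySem.Int.floordiv ((g.length : Nat) : Int) 2 = ((g.length / 2 : Nat) : Int) := by
    exact_mod_cast PySem.Int.floordiv_natCast g.length 2
  have hslice : PySem.List.slice g (some 0) (some ((g.length / 2 : Nat) : Int)) = g.take (g.length / 2) := by
    rw [PySem.List.slice_zero_start, PySem.List.slice_to_natCast]
  simp only [hlen, hhalf, hslice]
  set half := g.length / 2 with hhalfdef
  set ext := g ++ g.take half with hext
  have hextlen : ext.length = g.length + half := by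
    rw [hext]; simp [List.length_take]; omega
  set base := PatternCount symbol (String.ofList (g.take half)) with hbase
  rw [show PatternCountB symbol (String.ofList (g.take half)) = base from rfl]
  by_cases hn : g.length = 0
  · simp only [hn, Nat.cast_zero, PySem.List.pyRange_one_eq_nil (by norm_num : (0 : Int) ≤ 1),
        List.foldl_nil]
  · have h1 : 1 ≤ g.length := by omega
    have hhle : half ≤ ext.length := by omega
    rw [pvA_fold sym ext half base g.length h1 (by omega)]
    rw [pvB_fold (fun c => sym == [c]) ext half base _
          (fun j hj => pv_pref_get (fun c => sym == [c]) ext j hj)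
          g.length h1 (by omega) hhle]
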